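-- pv_equiv track=rewrite | github.com/SecureworldProject/CIPHER_HASH_RISTRAS_TEST | cifradores.py | encryp_Uva_fna
-- ===== SOURCE A (Python) =====
-- def encryp_Uva_fna(elem,frn,pos,clave):
--   '''Uva Real or bit'''
--   #Establecer tamaño del mensaje en 11 bytes, tanto si es mayor como si es menor
--   message = str(frn) + str(pos) + str(clave)
--
--
--   if len(message) > 33:
--       sep = [message[i:i+33] for i in range(0,len(message), 33)]
--
--       message=sep[0]
--
--       for i in message:
--           message = int(message) ^ int(sep[i])
--           message = str(message)
--
--   else:
--       while len(message) < 33: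
--           dif= 33 - len(message)
--           m= message [0:dif]
--           message= message + m
--
--
--   #Formar lista de 11 números (bloques) %256
--   message= [message[i:i+3] for i in range(0,len(message), 3)]
--   message= [int(message[i])%256 for i in range(0,len(message))]
--
--   elem= (hash_uva_fna(message)) %256
--
--   #print ('elem=', elem)
--   return elem
--
-- def hash_uva_fna(message):
--   '''F,G = (0)^(x1)^(x2)^(x3)^(x1&x3)^(x2&x3)^(x4)^(x1&x4)^(x2&x4)
--   H = (0) ^ (x1) ^ (x2) ^ (x3)
--   I = (0) ^ (x1) ^ (x2) ^ (x1&x2) ^ (x3)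
--   '''
--
--
--   #F= (message[1])^(message[0])^(message[2])^(message[1]&message[2])^(message[0]&message[2])^(message[3])^(message[1]&message[3])^(message[0]&message[3])
--   F = (message[3])^(message[2])^(message[0])^(message[3]&message[0])^(message[2]&message[0])^(message[1])^(message[3]&message[1])^(message[2]&message[1])
--
--   #G= (F)^(message[4])^(message[5])^(F&message[5])^(message[4]&message[5])^(message[6])^(F&message[6])^(message[4]&message[6])
--   G = (message[6])^(message[5])^(message[4])^(message[6]&message[4])^(message[5]&message[4])^(F)^(message[6]&F)^(message[5]&F)
--
--   H= (G ^ message[7] ^ message[8])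
--   #I = (H) ^ (message[9]) ^ (H&message[9]) ^ (message[10])
--   I = (message[10]) ^ (message[9]) ^ (message[10]&message[9]) ^ (H)
--   #I = H
--
--
--   hash = I % 256
--
--   return hash
-- ===== SOURCE B (Python) =====
-- def encryp_Uva_fna(elem, frn, pos, clave):
--     '''Uva Real or bit (closed-form padding, hash inlined)'''
--     message = str(frn) + str(pos) + str(clave)
--     # cyclic repetition truncated to 33 chars (closed form of the padding loop)
--     message = (message * (33 // len(message) + 1))[:33]
--     x = [int(message[i:i + 3]) % 256 for i in range(0, 33, 3)]
--     F = x[3] ^ x[2] ^ x[0] ^ (x[3] & x[0]) ^ (x[2] & x[0]) ^ x[1] ^ (x[3] & x[1]) ^ (x[2] & x[1])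
--     G = x[6] ^ x[5] ^ x[4] ^ (x[6] & x[4]) ^ (x[5] & x[4]) ^ F ^ (x[6] & F) ^ (x[5] & F)
--     H = G ^ x[7] ^ x[8]
--     I = x[10] ^ x[9] ^ (x[10] & x[9]) ^ H
--     return I % 256
-- ===== Notes on version B (the rewrite author's own statement) =====
-- stated objective: simpler
-- what changed: The while-loop that pads the message to 33 chars is replaced by the closed-form cyclic repetition (message * (33 // len(message) + 1))[:33], the two block-building comprehensions are fused into one, and the hash_uva_fna helper is inlined, so the whole function is one straight-line computation.
import Mathlib
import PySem

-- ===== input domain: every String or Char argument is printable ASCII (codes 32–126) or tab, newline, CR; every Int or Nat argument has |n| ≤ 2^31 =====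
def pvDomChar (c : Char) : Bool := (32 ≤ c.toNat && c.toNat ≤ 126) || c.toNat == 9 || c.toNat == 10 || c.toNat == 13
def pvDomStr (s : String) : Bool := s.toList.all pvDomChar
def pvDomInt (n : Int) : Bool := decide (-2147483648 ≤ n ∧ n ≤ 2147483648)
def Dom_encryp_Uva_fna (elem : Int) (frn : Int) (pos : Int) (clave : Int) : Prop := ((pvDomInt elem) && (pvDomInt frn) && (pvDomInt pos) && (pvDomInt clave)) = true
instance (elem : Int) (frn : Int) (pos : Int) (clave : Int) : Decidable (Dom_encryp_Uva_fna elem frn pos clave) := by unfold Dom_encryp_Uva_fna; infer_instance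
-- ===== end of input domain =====

-- B replaces A's char-by-char padding loop by the closed-form cyclic repetition, fuses the two
-- block comprehensions into one and inlines the hash helper (objective: simpler; same cost).

-- ===== PORT A =====
-- the while-loop:  while len(message) < 33: dif = 33-len(message); m = message[0:dif]; message = message + m
-- (on an empty message Python loops forever; unreachable here: str(n) is never empty)
def pvPadA (m : List Char) : List Char :=
  if m.length < 33 then
    if _h : m = [] then m
    else pvPadA (m ++ m.take (33 - m.length))
  else m
termination_by 33 - m.length
decreasing_by
  have hpos : 0 < m.length := List.length_pos_iff.mpr _h
  simp only [List.length_append, List.length_take]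
  omega

def hash_uva_fna (message : List Int) : Int :=
  -- message[i] is in range on every input Pre_ admits (the list always has 11 blocks); pyGetD's default is arbitrary
  let x0 := PySem.List.pyGetD message 0 0
  let x1 := PySem.List.pyGetD message 1 0
  let x2 := PySem.List.pyGetD message 2 0
  let x3 := PySem.List.pyGetD message 3 0
  let x4 := PySem.List.pyGetD message 4 0
  let x5 := PySem.List.pyGetD message 5 0
  let x6 := PySem.List.pyGetD message 6 0
  let x7 := PySem.List.pyGetD message 7 0
  let x8 := PySem.List.pyGetD message 8 0
  let x9 := PySem.List.pyGetD message 9 0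
  let x10 := PySem.List.pyGetD message 10 0
  let F := PySem.Int.bxor (PySem.Int.bxor (PySem.Int.bxor (PySem.Int.bxor (PySem.Int.bxor (PySem.Int.bxor (PySem.Int.bxor x3 x2) x0) (PySem.Int.band x3 x0)) (PySem.Int.band x2 x0)) x1) (PySem.Int.band x3 x1)) (PySem.Int.band x2 x1)
  let G := PySem.Int.bxor (PySem.Int.bxor (PySem.Int.bxor (PySem.Int.bxor (PySem.Int.bxor (PySem.Int.bxor (PySem.Int.bxor x6 x5) x4) (PySem.Int.band x6 x4)) (PySem.Int.band x5 x4)) F) (PySem.Int.band x6 F)) (PySem.Int.band x5 F)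
  let H := PySem.Int.bxor (PySem.Int.bxor G x7) x8
  let I := PySem.Int.bxor (PySem.Int.bxor (PySem.Int.bxor x10 x9) (PySem.Int.band x10 x9)) H
  PySem.Int.mod I 256

def encryp_Uva_fna (elem : Int) (frn : Int) (pos : Int) (clave : Int) : Int :=
  let message := PySem.Int.toChars frn ++ PySem.Int.toChars pos ++ PySem.Int.toChars clave
  if 33 < (message.length : Int) then
    -- in Python this branch always raises TypeError (sep is indexed by a character);
    -- it is unreachable under Dom (each str(n) has at most 11 chars, so len(message) ≤ 33)
    0
  else
    let padded := pvPadA message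
    let sep := (PySem.List.pyRange 0 (padded.length : Int) 3).map
      (fun i => PySem.List.slice padded (some i) (some (i + 3)))
    -- int() raising ValueError (a '-' inside a 3-char block) is excluded by Pre_; getD's 0 is arbitrary
    let nums := (PySem.List.pyRange 0 (sep.length : Int) 1).map
      (fun i => PySem.Int.mod ((PySem.Int.ofChars? (PySem.List.pyGetD sep i [])).getD 0) 256)
    PySem.Int.mod (hash_uva_fna nums) 256

-- ===== PORT B =====
def encryp_Uva_fna_alt (elem : Int) (frn : Int) (pos : Int) (clave : Int) : Int :=
  let m0 := PySem.Int.toChars frn ++ PySem.Int.toChars pos ++ PySem.Int.toChars clave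
  -- (message * (33 // len(message) + 1))[:33]; 33 // len is Nat division here, exact since both are ≥ 0
  let m := PySem.List.slice ((List.replicate (33 / m0.length + 1) m0).flatten) none (some 33)
  let x := (PySem.List.pyRange 0 33 3).map
    (fun i => PySem.Int.mod ((PySem.Int.ofChars? (PySem.List.slice m (some i) (some (i + 3)))).getD 0) 256)
  let F := PySem.Int.bxor (PySem.Int.bxor (PySem.Int.bxor (PySem.Int.bxor (PySem.Int.bxor (PySem.Int.bxor (PySem.Int.bxor (PySem.List.pyGetD x 3 0) (PySem.List.pyGetD x 2 0)) (PySem.List.pyGetD x 0 0)) (PySem.Int.band (PySem.List.pyGetD x 3 0) (PySem.List.pyGetD x 0 0))) (PySem.Int.band (PySem.List.pyGetD x 2 0) (PySem.List.pyGetD x 0 0))) (PySem.List.pyGetD x 1 0)) (PySem.Int.band (PySem.List.pyGetD x 3 0) (PySem.List.pyGetD x 1 0))) (PySem.Int.band (PySem.List.pyGetD x 2 0) (PySem.List.pyGetD x 1 0))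
  let G := PySem.Int.bxor (PySem.Int.bxor (PySem.Int.bxor (PySem.Int.bxor (PySem.Int.bxor (PySem.Int.bxor (PySem.Int.bxor (PySem.List.pyGetD x 6 0) (PySem.List.pyGetD x 5 0)) (PySem.List.pyGetD x 4 0)) (PySem.Int.band (PySem.List.pyGetD x 6 0) (PySem.List.pyGetD x 4 0))) (PySem.Int.band (PySem.List.pyGetD x 5 0) (PySem.List.pyGetD x 4 0))) F) (PySem.Int.band (PySem.List.pyGetD x 6 0) F)) (PySem.Int.band (PySem.List.pyGetD x 5 0) F)
  let H := PySem.Int.bxor (PySem.Int.bxor G (PySem.List.pyGetD x 7 0)) (PySem.List.pyGetD x 8 0)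
  let I := PySem.Int.bxor (PySem.Int.bxor (PySem.Int.bxor (PySem.List.pyGetD x 10 0) (PySem.List.pyGetD x 9 0)) (PySem.Int.band (PySem.List.pyGetD x 10 0) (PySem.List.pyGetD x 9 0))) H
  PySem.Int.mod I 256

-- ===== PRECONDITION & SPEC =====
-- Pre_ excludes exactly the inputs (inside Dom) on which A raises ValueError: int() fails on a
-- 3-char block of the cyclically padded message iff a '-' sign lands at a position not divisible
-- by 3; B raises the same ValueError at exactly those inputs.
def Pre_encryp_Uva_fna (elem : Int) (frn : Int) (pos : Int) (clave : Int) : Prop :=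
  let s := PySem.Int.toChars frn ++ PySem.Int.toChars pos ++ PySem.Int.toChars clave
  ∀ i ∈ List.range 33, s.getD (i % s.length) '0' = '-' → i % 3 = 0
instance (elem : Int) (frn : Int) (pos : Int) (clave : Int) : Decidable (Pre_encryp_Uva_fna elem frn pos clave) := by unfold Pre_encryp_Uva_fna; infer_instance

def pvWitness_encryp_Uva_fna : Int × Int × Int × Int := (0, 1, 2, 3)

def Spec_encryp_Uva_fna (elem : Int) (frn : Int) (pos : Int) (clave : Int) (out : Int) : Prop := out = encryp_Uva_fna_alt elem frn pos clave
instance (elem : Int) (frn : Int) (pos : Int) (clave : Int) (out : Int) : Decidable (Spec_encryp_Uva_fna elem frn pos clave out) := by unfold Spec_encryp_Uva_fna; infer_instance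

-- ===== CLAIM (what is proved, stated in full; the proofs are below) =====
def Claim_equal_encryp_Uva_fna : Prop := ∀ (elem : Int) (frn : Int) (pos : Int) (clave : Int), Dom_encryp_Uva_fna elem frn pos clave → Pre_encryp_Uva_fna elem frn pos clave → Spec_encryp_Uva_fna elem frn pos clave (encryp_Uva_fna elem frn pos clave)

-- ===== LEMMAS AND PROOFS =====

lemma pvLen_pow (m : List Char) (j : Nat) : ((List.replicate j m).flatten).length = j * m.length := by
  simp [List.length_flatten]

lemma pvPow_prefix (m : List Char) {a b : Nat} (h : a ≤ b) :
    (List.replicate a m).flatten <+: (List.replicate b m).flatten := by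
  refine ⟨(List.replicate (b - a) m).flatten, ?_⟩
  rw [← List.flatten_append, List.replicate_append_replicate, Nat.add_sub_cancel' h]

lemma pvTake33_eq {x y z : List Char} (hx : x <+: z) (hy : y <+: z)
    (hxl : 33 ≤ x.length) (hyl : 33 ≤ y.length) : x.take 33 = y.take 33 := by
  obtain ⟨t, ht⟩ := hx
  obtain ⟨u, hu⟩ := hy
  have hx' : List.take 33 (x ++ t) = List.take 33 x := by
    rw [List.take_append, Nat.sub_eq_zero_of_le hxl, List.take_zero, List.append_nil]
  have hy' : List.take 33 (y ++ u) = List.take 33 y := by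
    rw [List.take_append, Nat.sub_eq_zero_of_le hyl, List.take_zero, List.append_nil]
  rw [← hx', ht, ← hu, hy']

lemma pvK_mul (m : List Char) (hm : m ≠ []) : 34 ≤ (33 / m.length + 1) * m.length := by
  have hL : 0 < m.length := List.length_pos_iff.mpr hm
  have h1 := Nat.div_add_mod 33 m.length
  have h2 := Nat.mod_lt 33 hL
  have h3 : (33 / m.length + 1) * m.length = m.length * (33 / m.length) + m.length := by ring
  omega

lemma pvPad_pow (m : List Char) (hm : m ≠ []) (j : Nat) (hj : 0 < j)
    (hle : j * m.length ≤ 33) :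
    pvPadA ((List.replicate j m).flatten)
      = ((List.replicate (33 / m.length + 1) m).flatten).take 33 := by
  have hL : 0 < m.length := List.length_pos_iff.mpr hm
  have hlen := pvLen_pow m j
  have hK := pvK_mul m hm
  have hjL : 0 < j * m.length := Nat.mul_pos hj hL
  rw [pvPadA]
  by_cases hc : ((List.replicate j m).flatten).length < 33
  · rw [if_pos hc]
    have hne : (List.replicate j m).flatten ≠ [] := by
      intro h
      have : ((List.replicate j m).flatten).length = 0 := by rw [h]; rfl
      omega
    rw [dif_neg hne]
    have hdd : 33 - ((List.replicate j m).flatten).length = 33 - j * m.length := by omega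
    by_cases h2 : j * m.length ≤ 33 - j * m.length
    · -- doubling step: the appended copy is the whole current message
      have htake : ((List.replicate j m).flatten).take (33 - ((List.replicate j m).flatten).length)
          = (List.replicate j m).flatten := List.take_of_length_le (by omega)
      rw [htake, ← List.flatten_append, List.replicate_append_replicate]
      have hrec := pvPad_pow m hm (j + j) (by omega)
        (by
          have hd : (j + j) * m.length = j * m.length + j * m.length := by ring
          omega)
      exact hrec
    · -- final step: the appended prefix is truncated and the loop exits at length 33
      rw [pvPadA]
      have hlenA : ((List.replicate j m).flatten
          ++ ((List.replicate j m).flatten).take (33 - ((List.replicate j m).flatten).length)).length = 33 := by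
        simp only [List.length_append, List.length_take]
        omega
      rw [if_neg (by omega)]
      have hsplit : (List.replicate j m).flatten
            ++ ((List.replicate j m).flatten).take (33 - ((List.replicate j m).flatten).length)
          = ((List.replicate (j + j) m).flatten).take 33 := by
        have hdbl : (List.replicate (j + j) m).flatten
            = (List.replicate j m).flatten ++ (List.replicate j m).flatten := by
          rw [← List.replicate_append_replicate, List.flatten_append]
        rw [hdbl, List.take_append,
          List.take_of_length_le (l := (List.replicate j m).flatten) (i := 33) (by omega)]
      rw [hsplit]
      refine pvTake33_eq (z := (List.replicate (j + j + (33 / m.length + 1)) m).flatten)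
        (pvPow_prefix m ?_) (pvPow_prefix m ?_) ?_ ?_
      · exact Nat.le_add_right _ _
      · exact Nat.le_add_left _ _
      · rw [pvLen_pow]
        have hd : (j + j) * m.length = j * m.length + j * m.length := by ring
        omega
      · rw [pvLen_pow]; omega
  · rw [if_neg hc]
    have h33 : j * m.length = 33 := by omega
    rw [← List.take_of_length_le (i := 33) (l := (List.replicate j m).flatten) (by omega)]
    refine pvTake33_eq (z := (List.replicate (j + (33 / m.length + 1)) m).flatten)
      (pvPow_prefix m ?_) (pvPow_prefix m ?_) ?_ ?_
    · exact Nat.le_add_right _ _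
    · exact Nat.le_add_left _ _
    · rw [pvLen_pow]; omega
    · rw [pvLen_pow]; omega
termination_by 33 - j * m.length
decreasing_by
  have : (j + j) * m.length = j * m.length + j * m.length := by ring
  omega

lemma pvPad_closed (m : List Char) (hm : m ≠ []) (hle : m.length ≤ 33) :
    pvPadA m = ((List.replicate (33 / m.length + 1) m).flatten).take 33 := by
  have := pvPad_pow m hm 1 (by omega) (by omega)
  simpa using this

lemma pvToDigitsCore_ne_nil (f n : Nat) (l : List Char) (hl : l ≠ []) :
    Nat.toDigitsCore 10 f n l ≠ [] := by
  induction f generalizing n l with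
  | zero => simpa [Nat.toDigitsCore]
  | succ f ih =>
    rw [Nat.toDigitsCore]
    split
    · exact List.cons_ne_nil _ _
    · exact ih _ _ (List.cons_ne_nil _ _)

lemma pvToChars_ne_nil (n : Int) : PySem.Int.toChars n ≠ [] := by
  unfold PySem.Int.toChars
  split
  · exact List.cons_ne_nil _ _
  · rw [Nat.toDigits, Nat.toDigitsCore]
    split
    · exact List.cons_ne_nil _ _
    · exact pvToDigitsCore_ne_nil _ _ _ (List.cons_ne_nil _ _)

lemma pvToChars_len (n : Int) (h1 : -2147483648 ≤ n) (h2 : n ≤ 2147483648) :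
    (PySem.Int.toChars n).length ≤ 11 := by
  unfold PySem.Int.toChars
  split
  · have : (Nat.toDigits 10 n.natAbs).length ≤ 10 :=
      Nat.toDigits_length 10 n.natAbs 10 (by omega) (by omega)
    simpa using by omega
  · have : (Nat.toDigits 10 n.toNat).length ≤ 10 :=
      Nat.toDigits_length 10 n.toNat 10 (by omega) (by omega)
    omega

-- ===== VERDICT (by name: the statement is the Claim_ definition above) =====
theorem encryp_Uva_fna_spec : Claim_equal_encryp_Uva_fna := by
  intro elem frn pos clave hDom _hPre
  unfold Spec_encryp_Uva_fna
  simp only [Dom_encryp_Uva_fna, pvDomInt, Bool.and_eq_true, decide_eq_true_eq] at hDom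
  obtain ⟨⟨⟨-, h1⟩, h2⟩, h3⟩ := hDom
  unfold encryp_Uva_fna encryp_Uva_fna_alt
  dsimp only
  set m0 := PySem.Int.toChars frn ++ PySem.Int.toChars pos ++ PySem.Int.toChars clave with hm0
  have hne : m0 ≠ [] := by
    simp [hm0, pvToChars_ne_nil]
  have hlen : m0.length ≤ 33 := by
    have a1 := pvToChars_len frn h1.1 h1.2
    have a2 := pvToChars_len pos h2.1 h2.2
    have a3 := pvToChars_len clave h3.1 h3.2
    simp only [hm0, List.length_append]
    omega
  rw [if_neg (by push_cast; omega)]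
  have hpad := pvPad_closed m0 hne hlen
  set M := ((List.replicate (33 / m0.length + 1) m0).flatten).take 33 with hM
  have hMlen : M.length = 33 := by
    have := pvK_mul m0 hne
    simp only [hM, List.length_take, pvLen_pow]
    omega
  have hB : PySem.List.slice ((List.replicate (33 / m0.length + 1) m0).flatten) none (some 33) = M := by
    rw [hM]
    simp [pysem]
  rw [hpad, hB, hMlen]
  have h3r : PySem.List.pyRange 0 ((33 : Nat) : Int) 3 = [0, 3, 6, 9, 12, 15, 18, 21, 24, 27, 30] := by decide
  have h33 : PySem.List.pyRange 0 (33 : Int) 3 = [0, 3, 6, 9, 12, 15, 18, 21, 24, 27, 30] := by decide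
  have h11 : PySem.List.pyRange 0 ((11 : Nat) : Int) 1 = [0, 1, 2, 3, 4, 5, 6, 7, 8, 9, 10] := by decide
  have h11' : PySem.List.pyRange 0 (11 : Int) 1 = [0, 1, 2, 3, 4, 5, 6, 7, 8, 9, 10] := by decide
  simp only [h3r, h33, List.map_cons, List.map_nil, List.length_cons, List.length_nil]
  norm_num [h11, h11']
  unfold hash_uva_fna
  simp [PySem.List.pyGetD_ofNat', List.getD]
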